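-- pv_equiv track=rewrite | github.com/Ramen-Hub73/Hub-Program | Hub-Program.py | Zip
-- ===== SOURCE A (Python) =====
-- def Zip(list1, list2, zip_small=False) -> list:
-- 	if type(list1) != list or type(list2) != list:
-- 		raise TypeError("Both arguments 'list1' and 'list2' must be of type list")
--
-- 	biggest = list1 if len(list1) > len(list2) else (list2 if len(list2) > len(list1) else None)
-- 	smallest = list1 if biggest == list2 else (list2 if biggest == list1 else None)
--
-- 	if biggest == None:
-- 		biggest = list1
-- 		smallest = list2
--
-- 	reference = len(smallest) if zip_small else len(biggest)
--
-- 	zipped = []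
-- 	for i in range(reference):
-- 		try:
-- 			zipped.append(biggest[i])
-- 			zipped.append(smallest[i])
-- 		except Exception:
-- 			pass
--
-- 	return zipped
-- ===== SOURCE B (Python) =====
-- def Zip(list1, list2, zip_small=False) -> list:
--     if type(list1) != list or type(list2) != list:
--         raise TypeError("Both arguments 'list1' and 'list2' must be of type list")
--     if len(list1) >= len(list2):
--         biggest, smallest = list1, list2
--     else:
--         biggest, smallest = list2, list1
--     zipped = [x for pair in zip(biggest, smallest) for x in pair]
--     if not zip_small:
--         zipped += biggest[len(smallest):]
--     return zipped
-- ===== Notes on version B (the rewrite author's own statement) =====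
-- stated objective: idiomatic
-- what changed: Replaces the Optional-sentinel biggest/smallest selection and the index loop with try/except swallowing IndexError by a single >=-comparison, a zip-flatten comprehension for the interleaved prefix, and one slice concatenation for the tail when zip_small is false.
import Mathlib
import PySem

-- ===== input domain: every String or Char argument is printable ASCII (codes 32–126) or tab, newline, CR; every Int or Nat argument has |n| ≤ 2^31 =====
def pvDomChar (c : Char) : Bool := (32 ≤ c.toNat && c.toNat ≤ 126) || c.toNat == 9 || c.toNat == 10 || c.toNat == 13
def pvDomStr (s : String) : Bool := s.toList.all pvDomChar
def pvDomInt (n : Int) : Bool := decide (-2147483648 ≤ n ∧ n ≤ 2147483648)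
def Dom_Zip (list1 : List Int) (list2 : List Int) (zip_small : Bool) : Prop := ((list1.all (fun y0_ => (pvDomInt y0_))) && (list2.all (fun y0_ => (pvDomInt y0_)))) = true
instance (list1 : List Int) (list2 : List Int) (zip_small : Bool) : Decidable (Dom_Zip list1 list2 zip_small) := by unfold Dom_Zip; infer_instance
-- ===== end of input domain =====

-- B replaces the sentinel selection + index loop with try/except by a >=-selection, a zip-flatten, and one tail slice (idiomatic).


-- ===== PORT A =====
def Zip (list1 : List Int) (list2 : List Int) (zip_small : Bool) : List Int :=
  -- biggest = list1 if len(list1) > len(list2) else (list2 if len(list2) > len(list1) else None)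
  let biggest0 : Option (List Int) :=
    if list1.length > list2.length then some list1
    else if list2.length > list1.length then some list2 else none
  -- smallest = list1 if biggest == list2 else (list2 if biggest == list1 else None)
  let smallest0 : Option (List Int) :=
    if biggest0 = some list2 then some list1
    else if biggest0 = some list1 then some list2 else none
  -- if biggest == None: biggest = list1; smallest = list2
  let biggest : List Int := if biggest0 = none then list1 else biggest0.getD []
  let smallest : List Int := if biggest0 = none then list2 else smallest0.getD []
  let reference : Int := if zip_small then smallest.length else biggest.length
  -- for i in range(reference): try: append biggest[i]; append smallest[i]; except: pass
  (PySem.List.pyRange 0 reference 1).foldl (fun zipped i =>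
    match PySem.List.pyGet? biggest i with
    | none => zipped
    | some x =>
      match PySem.List.pyGet? smallest i with
      | none => zipped ++ [x]
      | some y => zipped ++ [x, y]) []

-- ===== PORT B =====
def Zip_alt (list1 : List Int) (list2 : List Int) (zip_small : Bool) : List Int :=
  let bs := if list1.length ≥ list2.length then (list1, list2) else (list2, list1)
  let biggest := bs.1
  let smallest := bs.2
  -- [x for pair in zip(biggest, smallest) for x in pair]
  let zipped := (biggest.zip smallest).flatMap (fun p => [p.1, p.2])
  if zip_small then zipped
  else zipped ++ PySem.List.slice biggest (some (smallest.length : Int)) none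

-- ===== PRECONDITION & SPEC =====
def Spec_Zip (list1 : List Int) (list2 : List Int) (zip_small : Bool) (out : List Int) : Prop := out = Zip_alt list1 list2 zip_small
instance (list1 : List Int) (list2 : List Int) (zip_small : Bool) (out : List Int) : Decidable (Spec_Zip list1 list2 zip_small out) := by unfold Spec_Zip; infer_instance

-- ===== CLAIM (what is proved, stated in full; the proofs are below) =====
def Claim_equal_Zip : Prop := ∀ (list1 : List Int) (list2 : List Int) (zip_small : Bool), Dom_Zip list1 list2 zip_small → Spec_Zip list1 list2 zip_small (Zip list1 list2 zip_small)

-- ===== LEMMAS AND PROOFS =====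

-- A's loop body, extracted (definitionally the lambda in Zip)
def zipStep (b s : List Int) (zipped : List Int) (i : Int) : List Int :=
  match PySem.List.pyGet? b i with
  | none => zipped
  | some x =>
    match PySem.List.pyGet? s i with
    | none => zipped ++ [x]
    | some y => zipped ++ [x, y]

theorem zip_take_of_le (b s : List Int) (k : Nat) (hk : s.length ≤ k) :
    (b.take k).zip s = b.zip s := by
  induction s generalizing b k with
  | nil => simp
  | cons y s' ih =>
    match b with
    | [] => simp
    | x :: b' =>
      obtain ⟨k', rfl⟩ : ∃ k', k = k' + 1 := ⟨k - 1, by simp at hk; omega⟩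
      simp only [List.take_succ_cons, List.zip_cons_cons]
      rw [ih b' k' (by simpa using hk)]

theorem zip_take_succ (b s : List Int) (m : Nat) (hmb : m < b.length) (hms : m < s.length) :
    (b.take (m + 1)).zip s = (b.take m).zip s ++ [(b[m], s[m])] := by
  induction m generalizing b s with
  | zero =>
    match b, s, hmb, hms with
    | x :: b', y :: s', _, _ => simp
  | succ k ih =>
    match b, s, hmb, hms with
    | x :: b', y :: s', hmb, hms =>
      simp only [List.take_succ_cons, List.zip_cons_cons, List.getElem_cons_succ]
      rw [ih b' s' (by simpa using hmb) (by simpa using hms)]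
      simp

-- A's fold over range(n) characterised: interleaved prefix, then the uncovered part of b.take n
theorem foldl_zipStep (b s : List Int) (hs : s.length ≤ b.length) (n : Nat) (hn : n ≤ b.length) :
    (PySem.List.pyRange 0 (n : Int) 1).foldl (zipStep b s) []
      = ((b.take n).zip s).flatMap (fun p => [p.1, p.2]) ++ (b.take n).drop s.length := by
  induction n with
  | zero => simp [PySem.List.pyRange_one_eq_nil]
  | succ m ih =>
    have hm : m ≤ b.length := Nat.le_of_succ_le hn
    have hcast : ((m : Int) + 1) = ((m + 1 : Nat) : Int) := by push_cast; ring
    rw [← hcast, PySem.List.pyRange_one_succ_right (by positivity), List.foldl_append, ih hm]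
    simp only [List.foldl_cons, List.foldl_nil]
    have hmb : m < b.length := hn
    have hb : PySem.List.pyGet? b (m : Int) = some (b[m]) := by
      simp [PySem.List.pyGet?, PySem.List.pyIdx?, hmb]
    by_cases hms : m < s.length
    · have hsget : PySem.List.pyGet? s (m : Int) = some (s[m]) := by
        simp [PySem.List.pyGet?, PySem.List.pyIdx?, hms]
      rw [zipStep, hb, hsget, zip_take_succ b s m hmb hms]
      have h2 : (b.take (m + 1)).drop s.length = [] := by
        apply List.drop_eq_nil_of_le; simp; omega
      have h3 : (b.take m).drop s.length = [] := by
        apply List.drop_eq_nil_of_le; simp; omega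
      simp [h2, h3]
    · have hsget : PySem.List.pyGet? s (m : Int) = none := by
        simp [PySem.List.pyGet?, PySem.List.pyIdx?]; omega
      rw [zipStep, hb, hsget]
      have h1 : (b.take (m + 1)).zip s = (b.take m).zip s := by
        rw [zip_take_of_le b s (m + 1) (by omega), zip_take_of_le b s m (by omega)]
      have h2 : (b.take (m + 1)).drop s.length = (b.take m).drop s.length ++ [b[m]] := by
        rw [List.take_add_one, List.getElem?_eq_getElem hmb,
          List.drop_append_of_le_length (by simp; omega)]
        simp
      rw [h1, h2]
      simp

-- not zip_small: full reference, agrees with zip-flatten plus tail slice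
theorem case_false (b s : List Int) (hs : s.length ≤ b.length) :
    (PySem.List.pyRange 0 (b.length : Int) 1).foldl (zipStep b s) []
      = (b.zip s).flatMap (fun p => [p.1, p.2]) ++ PySem.List.slice b (some (s.length : Int)) none := by
  rw [foldl_zipStep b s hs b.length le_rfl]
  simp [PySem.List.slice_from_natCast]

-- zip_small: reference is the smaller length, tail is empty
theorem case_true (b s : List Int) (hs : s.length ≤ b.length) :
    (PySem.List.pyRange 0 (s.length : Int) 1).foldl (zipStep b s) []
      = (b.zip s).flatMap (fun p => [p.1, p.2]) := by
  rw [foldl_zipStep b s hs s.length hs, zip_take_of_le b s s.length le_rfl]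
  have h : (b.take s.length).drop s.length = [] := by
    apply List.drop_eq_nil_of_le; simp
  simp [h]

-- ===== VERDICT (by name: the statement is the Claim_ definition above) =====
theorem Zip_spec : Claim_equal_Zip := by
  intro list1 list2 zip_small _
  unfold Spec_Zip Zip Zip_alt
  rcases lt_trichotomy list1.length list2.length with h | h | h
  · -- list2 is strictly bigger
    simp only [if_neg (by omega : ¬ list1.length > list2.length), if_pos h,
      if_neg (Option.some_ne_none list2), Option.getD_some,
      if_neg (by omega : ¬ list1.length ≥ list2.length)]
    cases zip_small with
    | false => simpa using case_false list2 list1 h.le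
    | true => simpa using case_true list2 list1 h.le
  · -- equal lengths: A's sentinel branch picks list1/list2, B's ≥ picks the same
    simp only [if_neg (by omega : ¬ list1.length > list2.length),
      if_neg (by omega : ¬ list2.length > list1.length),
      if_pos (by omega : list1.length ≥ list2.length)]
    cases zip_small with
    | false => simpa using case_false list1 list2 h.ge
    | true => simpa using case_true list1 list2 h.ge
  · -- list1 is strictly bigger
    have hne : list1 ≠ list2 := fun e => by rw [e] at h; omega
    simp only [if_pos h, Option.some.injEq, if_neg hne,
      if_neg (Option.some_ne_none list1), Option.getD_some,
      if_pos (by omega : list1.length ≥ list2.length)]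
    cases zip_small with
    | false => simpa using case_false list1 list2 h.le
    | true => simpa using case_true list1 list2 h.le
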